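-- pv_equiv track=rewrite | github.com/rahulguptagzb09/Leetcode-Python | medium/medium-1593-split-string-into-max-number-unique-substrings.py | maxUniqueSplit
-- ===== SOURCE A (Python) =====
-- def maxUniqueSplit(s: str) -> int:
--
--     def dfs(i, cur_set):
--         if i == len(s):
--             return 0
--         res = 0
--         for j in range(i, len(s)):
--             substr = s[i:j+1]
--             if substr in cur_set:
--                 continue
--             cur_set.add(substr)
--             res = max(res, 1 + dfs(j+1, cur_set))
--             cur_set.remove(substr)
--         return res
--
--     return dfs(0, set())
-- ===== SOURCE B (Python) =====
-- def maxUniqueSplit(s: str) -> int: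
--     best = 0
--     stack = [(0, frozenset())]
--     while stack:
--         i, used = stack.pop()
--         if len(used) > best:
--             best = len(used)
--         for j in range(i, len(s)):
--             piece = s[i:j + 1]
--             if piece not in used:
--                 stack.append((j + 1, used | {piece}))
--     return best
-- ===== Notes on version B (the rewrite author's own statement) =====
-- stated objective: alternative
-- what changed: A's recursive backtracking DFS (max of 1+recursion with add/remove on a shared set) is replaced by an iterative explicit-stack worklist that enumerates the reachable (position, used-pieces) states and tracks the maximum set size seen.
import Mathlib
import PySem

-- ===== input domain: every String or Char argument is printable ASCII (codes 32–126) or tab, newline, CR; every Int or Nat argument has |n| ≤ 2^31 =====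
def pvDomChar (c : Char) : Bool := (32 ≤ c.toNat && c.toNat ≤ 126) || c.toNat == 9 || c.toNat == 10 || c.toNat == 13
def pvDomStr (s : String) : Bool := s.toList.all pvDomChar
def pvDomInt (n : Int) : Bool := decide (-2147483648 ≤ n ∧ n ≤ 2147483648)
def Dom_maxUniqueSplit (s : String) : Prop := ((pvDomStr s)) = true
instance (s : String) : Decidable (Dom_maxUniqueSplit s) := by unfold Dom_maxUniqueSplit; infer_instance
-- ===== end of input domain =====

-- B replaces A's recursive backtracking DFS by an explicit-stack worklist that tracks the best
-- set size over reachable states (objective: alternative — same exponential search, different control structure).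

-- ===== PORT A =====
-- A's dfs: the 'for j in range(i, len(s))' loop is a foldl over pyRange; backtracking (add before /
-- remove after the recursive call) is passing 'PySem.Set.add used substr' to the callee.
-- The fuel (first Nat argument) is only a structural-recursion guard: each recursive call moves i
-- forward by at least 1, so recursion depth is at most len(s) + 1 and the initial fuel len(s) + 1
-- is never exhausted (dfsA_fuel below proves fuel-irrelevance).
def dfsA (sl : List Char) : Nat → Nat → PySem.Set (List Char) → Int
  | 0, _, _ => 0
  | fuel + 1, i, used =>
    if i = sl.length then 0
    else
      (PySem.List.pyRange (i : Int) (sl.length : Int)).foldl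
        (fun res j =>
          if PySem.Set.contains used (PySem.List.slice sl (some (i : Int)) (some (j + 1))) then res
          else
            max res (1 + dfsA sl fuel (j + 1).toNat
              (PySem.Set.add used (PySem.List.slice sl (some (i : Int)) (some (j + 1))))))
        0

def maxUniqueSplit (s : String) : Int := dfsA s.toList (s.toList.length + 1) 0 PySem.Set.empty

-- ===== PORT B =====
-- B's inner 'for j in range(i, len(s)): … stack.append(…)' is a foldl over pyRange appending the
-- fresh child states; goB is the 'while stack' loop (pop = getLast/dropLast).  The fuel is only a
-- structural-recursion guard: the worklist measure pvMeas (below) strictly decreases with every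
-- iteration, so the initial fuel (len(s)+2)^(len(s)+1) = pvMeas of the initial stack never runs out.
def stepB (sl : List Char) (i : Nat) (used : PySem.Set (List Char))
    (stack : List (Nat × PySem.Set (List Char))) : List (Nat × PySem.Set (List Char)) :=
  (PySem.List.pyRange (i : Int) (sl.length : Int)).foldl
    (fun st j =>
      if PySem.Set.contains used (PySem.List.slice sl (some (i : Int)) (some (j + 1))) then st
      else st ++ [((j + 1).toNat,
        PySem.Set.union used [PySem.List.slice sl (some (i : Int)) (some (j + 1))])])
    stack

def goB (sl : List Char) : Nat → List (Nat × PySem.Set (List Char)) → Int → Int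
  | 0, _, best => best
  | fuel + 1, stack, best =>
    if h : stack = [] then best
    else
      goB sl fuel (stepB sl (stack.getLast h).1 (stack.getLast h).2 stack.dropLast)
        (if PySem.Set.len (stack.getLast h).2 > best then PySem.Set.len (stack.getLast h).2 else best)

def maxUniqueSplit_alt (s : String) : Int :=
  goB s.toList ((s.toList.length + 2) ^ (s.toList.length + 1)) [(0, PySem.Set.empty)] 0

-- ===== PRECONDITION & SPEC =====
def Spec_maxUniqueSplit (s : String) (out : Int) : Prop := out = maxUniqueSplit_alt s
instance (s : String) (out : Int) : Decidable (Spec_maxUniqueSplit s out) := by unfold Spec_maxUniqueSplit; infer_instance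

-- ===== CLAIM (what is proved, stated in full; the proofs are below) =====
def Claim_equal_maxUniqueSplit : Prop := ∀ (s : String), Dom_maxUniqueSplit s → Spec_maxUniqueSplit s (maxUniqueSplit s)

-- ===== LEMMAS AND PROOFS =====

-- the slice s[i:j+1], the freshness test, and the child state pushed for a fresh piece
def sliceP (sl : List Char) (i : Nat) (j : Int) : List Char :=
  PySem.List.slice sl (some (i : Int)) (some (j + 1))

def freshP (sl : List Char) (i : Nat) (used : PySem.Set (List Char)) (j : Int) : Bool :=
  !PySem.Set.contains used (sliceP sl i j)

def childOf (sl : List Char) (i : Nat) (used : PySem.Set (List Char)) (j : Int) :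
    Nat × PySem.Set (List Char) :=
  ((j + 1).toNat, PySem.Set.add used (sliceP sl i j))

def kidsOf (sl : List Char) (i : Nat) (used : PySem.Set (List Char)) : List Int :=
  (PySem.List.pyRange (i : Int) (sl.length : Int)).filter (freshP sl i used)

-- value of a worklist state: pieces already placed plus A's best continuation from there
def Vst (sl : List Char) (st : Nat × PySem.Set (List Char)) : Int :=
  PySem.Set.len st.2 + dfsA sl (sl.length + 1) st.1 st.2

-- worklist termination measure
def pvMeas (n : Nat) (stack : List (Nat × PySem.Set (List Char))) : Nat :=
  (stack.map (fun st => (n + 2) ^ (n + 1 - st.1))).sum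

lemma pyRange_nil (a b : Int) (h : b ≤ a) : PySem.List.pyRange a b = [] := by
  apply List.eq_nil_iff_forall_not_mem.mpr
  intro x hx
  rw [PySem.List.mem_pyRange_one] at hx
  omega

lemma union_single (s : PySem.Set (List Char)) (p : List Char) :
    PySem.Set.union s [p] = PySem.Set.add s p := rfl

lemma len_add_fresh (s : PySem.Set (List Char)) (p : List Char) (h : p ∉ s) :
    PySem.Set.len (PySem.Set.add s p) = PySem.Set.len s + 1 := by
  simp [PySem.Set.add, PySem.Set.len, h]

-- A's loop over range(i, n) is the same loop over only the fresh j's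
lemma aLoop_eq (sl : List Char) (i : Nat) (used : PySem.Set (List Char)) (fuel : Nat) (r : Int) :
    (PySem.List.pyRange (i : Int) (sl.length : Int)).foldl
      (fun res j =>
        if PySem.Set.contains used (PySem.List.slice sl (some (i : Int)) (some (j + 1))) then res
        else
          max res (1 + dfsA sl fuel (j + 1).toNat
            (PySem.Set.add used (PySem.List.slice sl (some (i : Int)) (some (j + 1)))))) r
    = (kidsOf sl i used).foldl
        (fun res j => max res (1 + dfsA sl fuel (j + 1).toNat (PySem.Set.add used (sliceP sl i j)))) r := by
  rw [PySem.List.foldl_congr_mem _ _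
    (fun res j => if freshP sl i used j then
      max res (1 + dfsA sl fuel (j + 1).toNat (PySem.Set.add used (sliceP sl i j))) else res) r
    (by
      intro acc x _
      by_cases hm : PySem.List.slice sl (some (i : Int)) (some (x + 1)) ∈ used
      · simp [freshP, sliceP, hm]
      · simp [freshP, sliceP, hm])]
  rw [PySem.List.foldl_if_eq_foldl_filter]
  rfl

-- B's stack loop appends exactly the fresh children
lemma stepB_eq (sl : List Char) (i : Nat) (used : PySem.Set (List Char))
    (stack : List (Nat × PySem.Set (List Char))) :
    stepB sl i used stack = stack ++ (kidsOf sl i used).map (childOf sl i used) := by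
  unfold stepB
  rw [PySem.List.foldl_congr_mem _ _
    (fun st j => if freshP sl i used j then st ++ [childOf sl i used j] else st) stack
    (by
      intro acc x _
      by_cases hm : PySem.List.slice sl (some (i : Int)) (some (x + 1)) ∈ used
      · simp [freshP, sliceP, hm]
      · simp [freshP, sliceP, hm, childOf, union_single])]
  rw [PySem.List.foldl_append_if]
  rfl

-- A's dfs ignores fuel as long as there is more fuel than remaining positions
lemma dfsA_fuel (sl : List Char) :
    ∀ (d f g i : Nat) (used : PySem.Set (List Char)), sl.length - i ≤ d →
      sl.length - i < f → sl.length - i < g → dfsA sl f i used = dfsA sl g i used := by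
  intro d
  induction d with
  | zero =>
    intro f g i used hd hf hg
    match f, g with
    | f' + 1, g' + 1 =>
      simp only [dfsA]
      by_cases hi : i = sl.length
      · simp [hi]
      · have hle : (sl.length : Int) ≤ (i : Int) := by omega
        rw [if_neg hi, if_neg hi, pyRange_nil _ _ hle]
        simp
  | succ d ih =>
    intro f g i used hd hf hg
    match f, g with
    | f' + 1, g' + 1 =>
      simp only [dfsA]
      by_cases hi : i = sl.length
      · simp [hi]
      · rw [if_neg hi, if_neg hi]
        apply PySem.List.foldl_congr_mem
        intro acc x hx
        rw [PySem.List.mem_pyRange_one] at hx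
        by_cases hm : PySem.List.slice sl (some (i : Int)) (some (x + 1)) ∈ used
        · simp [hm]
        · have hrec := ih f' g' (x + 1).toNat
            (PySem.Set.add used (PySem.List.slice sl (some (i : Int)) (some (x + 1))))
            (by omega) (by omega) (by omega)
          rw [if_neg (by simpa using hm), if_neg (by simpa using hm), hrec]

lemma le_foldl_if_max (c : Int → Bool) (g : Int → Int) :
    ∀ (l : List Int) (r : Int), r ≤ l.foldl (fun res j => if c j then res else max res (g j)) r := by
  intro l
  induction l with
  | nil => simp
  | cons x t ih =>
    intro r
    simp only [List.foldl_cons]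
    by_cases hc : c x = true
    · simp only [hc, if_pos]
      exact ih r
    · simp only [hc, if_neg, Bool.not_eq_true]
      exact le_trans (le_max_left _ _) (ih _)

lemma dfsA_nonneg (sl : List Char) (fuel i : Nat) (used : PySem.Set (List Char)) :
    0 ≤ dfsA sl fuel i used := by
  match fuel with
  | 0 => simp [dfsA]
  | f + 1 =>
    simp only [dfsA]
    by_cases hi : i = sl.length
    · simp [hi]
    · rw [if_neg hi]
      exact le_foldl_if_max _ _ _ 0

lemma foldl_max_base (l : List (Nat × PySem.Set (List Char))) (V : Nat × PySem.Set (List Char) → Int)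
    (a b : Int) :
    l.foldl (fun acc st => max acc (V st)) (max a b) = max a (l.foldl (fun acc st => max acc (V st)) b) := by
  induction l generalizing a b with
  | nil => simp
  | cons x t ih =>
    simp only [List.foldl_cons]
    rw [max_assoc, ih]

-- folding the worklist values of the fresh children equals A's loop value at the parent
lemma kids_fold (sl : List Char) (i : Nat) (used : PySem.Set (List Char)) (fuel : Nat)
    (hfuel : sl.length - i ≤ fuel) :
    ∀ (K : List Int),
      (∀ j ∈ K, (i : Int) ≤ j ∧ j < (sl.length : Int) ∧ sliceP sl i j ∉ used) →
      ∀ (x r : Int),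
      (K.map (childOf sl i used)).foldl (fun a st => max a (Vst sl st))
          (max x (PySem.Set.len used + r))
        = max x (PySem.Set.len used +
            K.foldl (fun res j => max res (1 + dfsA sl fuel (j + 1).toNat
              (PySem.Set.add used (sliceP sl i j)))) r) := by
  intro K
  induction K with
  | nil => simp
  | cons j K ih =>
    intro hK x r
    obtain ⟨hij, hjn, hfr⟩ := hK j (by simp)
    simp only [List.map_cons, List.foldl_cons]
    have hVst : Vst sl (childOf sl i used j) =
        PySem.Set.len used + 1 + dfsA sl fuel (j + 1).toNat (PySem.Set.add used (sliceP sl i j)) := by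
      simp only [Vst, childOf]
      rw [len_add_fresh used _ hfr]
      have hst := dfsA_fuel sl sl.length (sl.length + 1) fuel (j + 1).toNat
        (PySem.Set.add used (sliceP sl i j)) (by omega) (by omega) (by omega)
      rw [hst]
    rw [hVst]
    have hb : max (max x (PySem.Set.len used + r))
        (PySem.Set.len used + 1 + dfsA sl fuel (j + 1).toNat (PySem.Set.add used (sliceP sl i j))) =
        max x (PySem.Set.len used +
          max r (1 + dfsA sl fuel (j + 1).toNat (PySem.Set.add used (sliceP sl i j)))) := by
      omega
    rw [hb]
    exact ih (fun j' hj' => hK j' (List.mem_cons_of_mem _ hj')) x _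

-- per-state: folding the children's values into max x |used| gives max x (value of the state)
lemma state_val (sl : List Char) (i : Nat) (used : PySem.Set (List Char)) (x : Int) :
    ((kidsOf sl i used).map (childOf sl i used)).foldl (fun a st => max a (Vst sl st))
        (max x (PySem.Set.len used))
      = max x (Vst sl (i, used)) := by
  have hK : ∀ j ∈ kidsOf sl i used, (i : Int) ≤ j ∧ j < (sl.length : Int) ∧
      sliceP sl i j ∉ used := by
    intro j hj
    unfold kidsOf at hj
    rw [List.mem_filter] at hj
    obtain ⟨hmem, hfresh⟩ := hj
    rw [PySem.List.mem_pyRange_one] at hmem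
    refine ⟨hmem.1, hmem.2, ?_⟩
    simpa [freshP] using hfresh
  have h0 : max x (PySem.Set.len used) = max x (PySem.Set.len used + 0) := by omega
  rw [h0, kids_fold sl i used sl.length (by omega) (kidsOf sl i used) hK x 0]
  have hinner : (kidsOf sl i used).foldl
      (fun res j => max res (1 + dfsA sl sl.length (j + 1).toNat
        (PySem.Set.add used (sliceP sl i j)))) 0 = dfsA sl (sl.length + 1) i used := by
    by_cases hi : i = sl.length
    · subst hi
      unfold kidsOf
      rw [pyRange_nil _ _ (le_refl _)]
      simp [dfsA]
    · simp only [dfsA]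
      rw [if_neg hi, aLoop_eq]
  rw [hinner]
  simp [Vst]

lemma pvMeas_append (n : Nat) (l : List (Nat × PySem.Set (List Char))) (x : Nat × PySem.Set (List Char)) :
    pvMeas n (l ++ [x]) = pvMeas n l + (n + 2) ^ (n + 1 - x.1) := by
  simp [pvMeas]

lemma pvMeas_pos (n : Nat) (stack : List (Nat × PySem.Set (List Char))) (h : stack ≠ []) :
    1 ≤ pvMeas n stack := by
  match stack with
  | x :: t =>
    have : 1 ≤ (n + 2) ^ (n + 1 - x.1) := Nat.one_le_pow _ _ (by omega)
    simp [pvMeas]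
    omega

-- geometric bound on the measure of the children pushed from a state at position j
lemma sumFil (n : Nat) (q : Int → Bool) :
    ∀ (d j : Nat), n - j ≤ d →
      ((((PySem.List.pyRange (j : Int) (n : Int)).filter q).map
        (fun jj => (n + 2) ^ (n + 1 - (jj + 1).toNat))).sum)
        ≤ (n + 2) ^ (n + 1 - j) - 1 := by
  intro d
  induction d with
  | zero =>
    intro j hj
    rw [pyRange_nil _ _ (by omega)]
    simp
  | succ d ih =>
    intro j hj
    by_cases hjn : j < n
    · rw [PySem.List.pyRange_one_cons (by omega)]
      have htail := ih (j + 1) (by omega)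
      have hcast : ((j : Int) + 1) = ((j + 1 : Nat) : Int) := by omega
      have he : n + 1 - (j + 1) = n - j := by omega
      have he2 : n + 1 - j = n - j + 1 := by omega
      have hpos : 1 ≤ (n + 2) ^ (n - j) := Nat.one_le_pow _ _ (by omega)
      have hdouble : 2 * (n + 2) ^ (n - j) ≤ (n + 2) ^ (n - j + 1) := by
        rw [pow_succ, Nat.mul_comm 2 _]
        exact Nat.mul_le_mul_left _ (by omega)
      rw [hcast] at *
      rw [he] at htail
      have hhead : (((j : Int)) + 1).toNat = j + 1 := by omega
      by_cases hq : q (j : Int) = true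
      · rw [List.filter_cons_of_pos hq]
        simp only [List.map_cons, List.sum_cons, hhead, he]
        rw [he2]
        omega
      · rw [List.filter_cons_of_neg (by simp [hq])]
        rw [he2]
        omega
    · rw [pyRange_nil _ _ (by omega)]
      simp

lemma meas_step (sl : List Char) (i : Nat) (used : PySem.Set (List Char))
    (rest : List (Nat × PySem.Set (List Char))) :
    pvMeas sl.length (stepB sl i used rest) ≤
      pvMeas sl.length rest + ((sl.length + 2) ^ (sl.length + 1 - i) - 1) := by
  rw [stepB_eq]
  unfold pvMeas
  rw [List.map_append, List.sum_append, List.map_map]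
  have hb := sumFil sl.length (freshP sl i used) sl.length i (by omega)
  have hc : ((kidsOf sl i used).map
      ((fun st => (sl.length + 2) ^ (sl.length + 1 - st.1)) ∘ childOf sl i used)).sum =
      (((PySem.List.pyRange (i : Int) (sl.length : Int)).filter (freshP sl i used)).map
        (fun jj => (sl.length + 2) ^ (sl.length + 1 - (jj + 1).toNat))).sum := by
    unfold kidsOf
    congr 1
  rw [hc]
  omega

-- the worklist loop computes the running max of the values of all stacked states
lemma goB_eq (sl : List Char) :
    ∀ (fuel : Nat) (stack : List (Nat × PySem.Set (List Char))) (best : Int),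
      pvMeas sl.length stack ≤ fuel →
      goB sl fuel stack best = stack.foldl (fun a st => max a (Vst sl st)) best := by
  intro fuel
  induction fuel with
  | zero =>
    intro stack best hm
    match stack with
    | [] => simp [goB]
    | x :: t => exact absurd hm (by have := pvMeas_pos sl.length (x :: t) (by simp); omega)
  | succ fuel ih =>
    intro stack best hm
    simp only [goB]
    by_cases h : stack = []
    · simp [h]
    · simp only [h, dif_neg, not_false_iff]
      have h1 := meas_step sl (stack.getLast h).1 (stack.getLast h).2 stack.dropLast
      have h2 : pvMeas sl.length stack =
          pvMeas sl.length stack.dropLast +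
            (sl.length + 2) ^ (sl.length + 1 - (stack.getLast h).1) := by
        conv_lhs => rw [← List.dropLast_append_getLast h]
        rw [pvMeas_append]
      have hpos : 1 ≤ (sl.length + 2) ^ (sl.length + 1 - (stack.getLast h).1) :=
        Nat.one_le_pow _ _ (by omega)
      rw [ih _ _ (by omega)]
      rw [stepB_eq, List.foldl_append]
      have hbest : (if PySem.Set.len (stack.getLast h).2 > best then PySem.Set.len (stack.getLast h).2 else best) =
          max best (PySem.Set.len (stack.getLast h).2) := by
        split_ifs with hgt <;> omega
      rw [hbest, max_comm best _, foldl_max_base]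
      rw [max_comm (PySem.Set.len (stack.getLast h).2) _, state_val]
      conv_rhs => rw [← List.dropLast_append_getLast h]
      rw [List.foldl_append]
      simp only [List.foldl_cons, List.foldl_nil]

-- ===== VERDICT (by name: the statement is the Claim_ definition above) =====
theorem maxUniqueSplit_spec : Claim_equal_maxUniqueSplit := by
  intro s _
  unfold Spec_maxUniqueSplit maxUniqueSplit maxUniqueSplit_alt
  rw [goB_eq s.toList _ _ _ (by simp [pvMeas])]
  simp only [List.foldl_cons, List.foldl_nil, Vst]
  have h0 : PySem.Set.len (PySem.Set.empty (α := List Char)) = 0 := rfl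
  rw [h0]
  have := dfsA_nonneg s.toList (s.toList.length + 1) 0 PySem.Set.empty
  omega
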